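-- pv_equiv track=rewrite | github.com/posl/comment_recommendation | script/split_gen/2_time/zh/156_C/8.py | get_min_energy
-- ===== SOURCE A (Python) =====
-- def get_min_energy(n, x):
--     # n: 人数
--     # x: 坐标
--     min_energy = 0
--     for i in range(1, 101):
--         energy = 0
--         for j in range(n):
--             energy += (x[j] - i)**2
--         if i == 1:
--             min_energy = energy
--         else:
--             if energy < min_energy:
--                 min_energy = energy
--     return min_energy
-- ===== SOURCE B (Python) =====
-- def get_min_energy(n, x):
--     pts = x[:max(n, 0)]
--     m = len(pts)
--     s = sum(pts)
--     s2 = sum(v * v for v in pts)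
--     return min(s2 + i * (m * i - 2 * s) for i in range(1, 101))
-- ===== Notes on version B (the rewrite author's own statement) =====
-- stated objective: faster
-- what changed: Instead of re-summing (x[j]-i)^2 over all n points for each of the 100 candidate positions, B computes sum(x[:n]) and sum of squares once and evaluates each candidate's energy by the expanded quadratic s2 + i*(n*i - 2*s) in O(1), taking the min.
import Mathlib
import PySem

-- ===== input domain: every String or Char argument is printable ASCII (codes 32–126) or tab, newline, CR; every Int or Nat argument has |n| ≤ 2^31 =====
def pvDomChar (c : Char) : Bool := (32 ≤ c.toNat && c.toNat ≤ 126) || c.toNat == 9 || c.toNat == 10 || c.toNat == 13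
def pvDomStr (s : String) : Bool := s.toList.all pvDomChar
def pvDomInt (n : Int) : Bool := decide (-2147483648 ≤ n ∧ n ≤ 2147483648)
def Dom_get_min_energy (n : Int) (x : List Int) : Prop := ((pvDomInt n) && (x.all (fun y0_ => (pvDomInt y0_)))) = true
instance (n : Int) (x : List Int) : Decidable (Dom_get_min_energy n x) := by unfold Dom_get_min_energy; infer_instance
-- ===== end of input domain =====

-- B replaces A's 100 passes over the points by one pass (sum and sum of squares) plus a
-- closed-form O(1) energy per candidate position: asymptotically faster, same values.

-- ===== PORT A =====
def get_min_energy (n : Int) (x : List Int) : Int :=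
  (PySem.List.pyRange 1 101 1).foldl
    (fun min_energy i =>
      let energy := (PySem.List.pyRange 0 n 1).foldl
        (fun energy j => energy + (PySem.List.pyGetD x j 0 - i) ^ 2) 0
      if i = 1 then energy
      else if energy < min_energy then energy else min_energy)
    0

-- ===== PORT B =====
def get_min_energy_alt (n : Int) (x : List Int) : Int :=
  let pts := PySem.List.slice x none (some (max n 0))
  let m : Int := pts.length
  let s : Int := pts.sum
  let s2 : Int := (pts.map (fun v => v * v)).sum
  ((PySem.List.min? ((PySem.List.pyRange 1 101 1).map
      (fun i => s2 + i * (m * i - 2 * s))) id).getD 0)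

-- ===== PRECONDITION & SPEC =====
-- A indexes x[j] for j in range(n): it raises IndexError exactly when n > len(x).
def Pre_get_min_energy (n : Int) (x : List Int) : Prop := n ≤ (x.length : Int)
instance (n : Int) (x : List Int) : Decidable (Pre_get_min_energy n x) := by unfold Pre_get_min_energy; infer_instance
def pvWitness_get_min_energy : Int × List Int := (2, [3, 7])

def Spec_get_min_energy (n : Int) (x : List Int) (out : Int) : Prop := out = get_min_energy_alt n x
instance (n : Int) (x : List Int) (out : Int) : Decidable (Spec_get_min_energy n x out) := by unfold Spec_get_min_energy; infer_instance

-- ===== CLAIM (what is proved, stated in full; the proofs are below) =====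
def Claim_equal_get_min_energy : Prop := ∀ (n : Int) (x : List Int), Dom_get_min_energy n x → Pre_get_min_energy n x → Spec_get_min_energy n x (get_min_energy n x)

-- ===== LEMMAS AND PROOFS =====

-- the per-index map over range(n) is the prefix x[:n]
lemma range_getD_take (x : List Int) (n : Int) (h : n ≤ (x.length : Int)) :
    (PySem.List.pyRange 0 n 1).map (fun j => PySem.List.pyGetD x j 0) = x.take n.toNat := by
  by_cases hn : n ≤ 0
  · rw [PySem.List.pyRange_one_eq_nil hn]
    have : n.toNat = 0 := by omega
    simp [this]
  · have hn' : 0 < n := by omega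
    have hlen : ((x.take n.toNat).length : Int) = n := by
      simp; omega
    have hcong : (PySem.List.pyRange 0 n 1).map (fun j => PySem.List.pyGetD x j 0)
        = (PySem.List.pyRange 0 n 1).map (fun j => PySem.List.pyGetD (x.take n.toNat) j 0) := by
      apply List.map_congr_left
      intro j hj
      rw [PySem.List.mem_pyRange_one] at hj
      rw [PySem.List.pyGetD_eq_getElem x 0 hj.1 (by omega),
          PySem.List.pyGetD_eq_getElem (x.take n.toNat) 0 hj.1 (by simp; omega)]
      simp [List.getElem_take]
    rw [hcong]
    generalize x.take n.toNat = t at hlen ⊢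
    rw [← hlen, PySem.List.map_pyGetD_pyRange_zero']

-- expand the quadratic: Σ (v-i)² = Σ v² + i·(m·i − 2·Σ v)
lemma sum_sq_expand (l : List Int) (i : Int) :
    (l.map (fun v => (v - i) ^ 2)).sum
      = (l.map (fun v => v * v)).sum + i * ((l.length : Int) * i - 2 * l.sum) := by
  induction l with
  | nil => simp
  | cons a t ih =>
    simp only [List.map_cons, List.sum_cons, List.length_cons, ih]
    push_cast
    ring

-- min? with key id on a nonempty list is the strict-< fold
lemma min?_cons (a : Int) (l : List Int) :
    PySem.List.min? (a :: l) (id : Int → Int)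
      = some (l.foldl (fun m x => if x < m then x else m) a) := by
  induction l generalizing a with
  | nil => rfl
  | cons b t ih =>
    have h1 : PySem.List.min? (a :: b :: t) (id : Int → Int)
        = PySem.List.min? ((if b < a then b else a) :: t) (id : Int → Int) := by
      simp only [PySem.List.min?, List.foldl_cons, id_eq]
      split <;> rfl
    rw [h1, ih]
    simp only [List.foldl_cons]

-- A's first-iteration-sets-then-strict-min loop equals min? of the mapped candidates
lemma outer_fold (g : Int → Int) :
    (PySem.List.pyRange 1 101 1).foldl
      (fun acc i => if i = 1 then g i else if g i < acc then g i else acc) 0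
    = ((PySem.List.min? ((PySem.List.pyRange 1 101 1).map g) id).getD 0) := by
  rw [PySem.List.pyRange_one_cons (by norm_num : (1:Int) < 101)]
  simp only [List.map_cons, min?_cons, Option.getD_some, List.foldl_cons, reduceIte,
    List.foldl_map]
  apply PySem.List.foldl_congr_mem
  intro acc i hi
  rw [PySem.List.mem_pyRange_one] at hi
  have h1 : i ≠ 1 := by omega
  simp [h1]

-- A's inner loop energy equals B's closed form, under the index precondition
lemma energy_eq (n : Int) (x : List Int) (h : n ≤ (x.length : Int)) (i : Int) :
    (PySem.List.pyRange 0 n 1).foldl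
        (fun energy j => energy + (PySem.List.pyGetD x j 0 - i) ^ 2) 0
      = ((x.take n.toNat).map (fun v => v * v)).sum
        + i * (((x.take n.toNat).length : Int) * i - 2 * (x.take n.toNat).sum) := by
  rw [PySem.List.foldl_add]
  have : (fun j => (PySem.List.pyGetD x j 0 - i) ^ 2)
      = (fun v => (v - i) ^ 2) ∘ (fun j => PySem.List.pyGetD x j 0) := rfl
  rw [this, ← List.map_map, range_getD_take x n h, sum_sq_expand]
  ring

-- ===== VERDICT (by name: the statement is the Claim_ definition above) =====
theorem get_min_energy_spec : Claim_equal_get_min_energy := by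
  intro n x _ hpre
  unfold Spec_get_min_energy get_min_energy get_min_energy_alt
  have hslice : PySem.List.slice x none (some (max n 0)) = x.take n.toNat := by
    rw [PySem.List.slice_to x (le_max_right n 0)]
    congr 1
    omega
  simp only [hslice]
  have hbody : (PySem.List.pyRange 1 101 1).foldl
      (fun min_energy i =>
        let energy := (PySem.List.pyRange 0 n 1).foldl
          (fun energy j => energy + (PySem.List.pyGetD x j 0 - i) ^ 2) 0
        if i = 1 then energy
        else if energy < min_energy then energy else min_energy) 0
      = (PySem.List.pyRange 1 101 1).foldl
      (fun acc i =>
        if i = 1 then ((x.take n.toNat).map (fun v => v * v)).sum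
            + i * (((x.take n.toNat).length : Int) * i - 2 * (x.take n.toNat).sum)
        else if ((x.take n.toNat).map (fun v => v * v)).sum
            + i * (((x.take n.toNat).length : Int) * i - 2 * (x.take n.toNat).sum) < acc
          then ((x.take n.toNat).map (fun v => v * v)).sum
            + i * (((x.take n.toNat).length : Int) * i - 2 * (x.take n.toNat).sum)
          else acc) 0 := by
    apply PySem.List.foldl_congr_mem
    intro acc i _
    simp only [energy_eq n x hpre i]
  rw [hbody, outer_fold]
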